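-- pv_equiv track=rewrite | github.com/jsovcik/TFtest | tagging.py | tag_str_list
-- ===== SOURCE A (Python) =====
-- def tag_str_list (text, name, entTag):
--     """takes list for a text and a list of word with an entity tag and return the list of tags corresponding to the text"""
--     tag_list = []
--     n = len(text)
--     m = len(name)
--     i = 0
--     while (i< n):
--         if (text[i] != name[0]):
--             tag_list.append("O")
--             i = i+1
--         else:
--             if (m == 1):
--                 tag_list.append("S-"+entTag)
--                 i = i + 1
--             else:
--                 # check if the following in text is the entity given in st_list
--                 is_ent = (i + m) <= n
--                 j = 1
--                 while (is_ent and (j < m)):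
--                     is_ent = (text[i+j] == name[j])
--                     j = j+1
--                 # update the tag list accordingly
--                 if is_ent:
--                     tag_list.append("B-"+entTag)
--                     for k in range(1, m-1):
--                         tag_list.append("B-"+entTag)
--                     tag_list.append("E-"+entTag)
--                     i = i+m
--                 else:
--                     tag_list.append("O")
--                     i = i + 1
--     return tag_list
-- ===== SOURCE B (Python) =====
-- def tag_str_list(text, name, entTag):
--     """takes list for a text and a list of word with an entity tag and return the list of tags corresponding to the text"""
--     n = len(text)
--     m = len(name)
--     if not name:
--         return ["O"] * n
--     # pass 1: every position where the pattern occurs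
--     starts = [i for i in range(n - m + 1) if text[i:i + m] == name]
--     # pass 2: greedily keep the non-overlapping occurrences, left to right
--     chosen = []
--     last_end = 0
--     for i in starts:
--         if last_end <= i:
--             chosen.append(i)
--             last_end = i + m
--     # pass 3: paint the tag blocks over an all-"O" canvas
--     block = ["S-" + entTag] if m == 1 else ["B-" + entTag] * (m - 1) + ["E-" + entTag]
--     tags = ["O"] * n
--     for i in chosen:
--         tags[i:i + m] = block
--     return tags
-- ===== Notes on version B (the rewrite author's own statement) =====
-- stated objective: alternative
-- what changed: B is staged instead of A's single interleaved consume-and-emit scan: pass 1 lists every match position, pass 2 greedily selects the non-overlapping ones with a fold, pass 3 paints precomputed tag blocks over an all-'O' canvas.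
import Mathlib
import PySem

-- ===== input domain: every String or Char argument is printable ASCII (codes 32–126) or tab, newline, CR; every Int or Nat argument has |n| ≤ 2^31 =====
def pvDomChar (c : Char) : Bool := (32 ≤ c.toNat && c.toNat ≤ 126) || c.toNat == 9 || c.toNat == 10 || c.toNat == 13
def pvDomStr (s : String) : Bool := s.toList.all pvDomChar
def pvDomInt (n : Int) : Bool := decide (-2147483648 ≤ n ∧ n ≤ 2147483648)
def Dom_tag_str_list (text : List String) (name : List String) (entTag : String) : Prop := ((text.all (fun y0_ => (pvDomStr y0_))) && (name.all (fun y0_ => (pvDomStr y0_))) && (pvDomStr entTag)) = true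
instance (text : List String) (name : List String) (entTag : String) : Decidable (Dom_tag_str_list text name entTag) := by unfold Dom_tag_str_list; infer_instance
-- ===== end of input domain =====

-- B replaces A's single interleaved consume-and-emit scan by three staged passes
-- (list all match positions, greedily select non-overlapping ones, paint tag blocks
-- over an all-"O" canvas); objective: alternative, same asymptotic cost.

-- ===== PORT A =====
-- inner while: `while (is_ent and (j < m)): is_ent = (text[i+j] == name[j]); j = j+1`
def tagA_inner (text name : List String) (i m : Nat) (isEnt : Bool) (j : Nat) : Bool :=
  if isEnt ∧ j < m then
    tagA_inner text name i m (text.getD (i + j) "" == name.getD j "") (j + 1)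
  else isEnt
termination_by m - j

-- outer while over i; `max m 1` is a pure termination guard: inside Pre_ (name ≠ []) m ≥ 1, so it is i + m as in Python
def tagA_loop (text name : List String) (entTag : String) (n m i : Nat) (acc : List String) : List String :=
  if _h : i < n then
    if text.getD i "" ≠ name.getD 0 "" then
      tagA_loop text name entTag n m (i + 1) (acc ++ ["O"])
    else if m = 1 then
      tagA_loop text name entTag n m (i + 1) (acc ++ ["S-" ++ entTag])
    else
      let isEnt := tagA_inner text name i m (decide (i + m ≤ n)) 1
      if isEnt then
        tagA_loop text name entTag n m (i + max m 1)
          (((acc ++ ["B-" ++ entTag]) ++ (List.range' 1 (m - 1 - 1)).map (fun _ => "B-" ++ entTag)) ++ ["E-" ++ entTag])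
      else
        tagA_loop text name entTag n m (i + 1) (acc ++ ["O"])
  else acc
termination_by n - i
decreasing_by all_goals omega

def tag_str_list (text : List String) (name : List String) (entTag : String) : List String :=
  tagA_loop text name entTag text.length name.length 0 []

-- ===== PORT B =====
-- the comprehension's condition `text[i:i+m] == name`, as a named helper
def pMatch (text name : List String) (i : Nat) : Bool :=
  PySem.List.slice text (some (i : Int)) (some ((i : Int) + (name.length : Int))) == name

-- pass 1: `starts = [i for i in range(n - m + 1) if text[i:i+m] == name]`
--   (with m ≥ 1 the Nat length n + 1 - m equals Python's max(0, n - m + 1))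
-- pass 2: `for i in starts: if last_end <= i: chosen.append(i); last_end = i + m`
-- pass 3: `tags = ["O"]*n; for i in chosen: tags[i:i+m] = block`
def tag_str_list_alt (text : List String) (name : List String) (entTag : String) : List String :=
  let n := text.length
  let m := name.length
  if name.isEmpty then List.replicate n "O"
  else
    let starts := (List.range (n + 1 - m)).filter (pMatch text name)
    let chosen := (starts.foldl
      (fun (s : List Nat × Nat) i => if s.2 ≤ i then (s.1 ++ [i], i + m) else s) ([], 0)).1
    let block := if m = 1 then ["S-" ++ entTag]
                 else List.replicate (m - 1) ("B-" ++ entTag) ++ ["E-" ++ entTag]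
    chosen.foldl (fun tags i => tags.take i ++ block ++ tags.drop (i + m)) (List.replicate n "O")

-- ===== PRECONDITION & SPEC =====
-- Pre_ excludes only name = [] with nonempty text, exactly the inputs on which Python A raises IndexError at name[0].
def Pre_tag_str_list (text : List String) (name : List String) (_entTag : String) : Prop := text = [] ∨ name ≠ []
instance (text : List String) (name : List String) (entTag : String) : Decidable (Pre_tag_str_list text name entTag) := by unfold Pre_tag_str_list; infer_instance

def pvWitness_tag_str_list : List String × List String × String :=
  (["the", "New", "York", "trip", "New"], ["New", "York"], "LOC")

def Spec_tag_str_list (text : List String) (name : List String) (entTag : String) (out : List String) : Prop := out = tag_str_list_alt text name entTag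
instance (text : List String) (name : List String) (entTag : String) (out : List String) : Decidable (Spec_tag_str_list text name entTag out) := by unfold Spec_tag_str_list; infer_instance

-- ===== CLAIM (what is proved, stated in full; the proofs are below) =====
def Claim_equal_tag_str_list : Prop := ∀ (text : List String) (name : List String) (entTag : String), Dom_tag_str_list text name entTag → Pre_tag_str_list text name entTag → Spec_tag_str_list text name entTag (tag_str_list text name entTag)

-- ===== LEMMAS AND PROOFS =====
-- (everything below is parametrised explicitly; no sections)

-- A's tagging loop written as structural recursion over the position (no accumulator)
def tagR (text name : List String) (block : List String) (e : Nat) : List String :=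
  if e < text.length then
    if pMatch text name e then block ++ tagR text name block (max (e + name.length) (e + 1))
    else "O" :: tagR text name block (e + 1)
  else []
termination_by text.length - e
decreasing_by all_goals omega

-- the greedily selected match positions, as a recursion over the position
def selR (text name : List String) (e : Nat) : List Nat :=
  if e < text.length then
    if pMatch text name e then e :: selR text name (max (e + name.length) (e + 1))
    else selR text name (e + 1)
  else []
termination_by text.length - e
decreasing_by all_goals omega

-- B's pass-2 greedy selection, as a recursion over the starts list
def greedySel (m e : Nat) : List Nat → List Nat
  | [] => []
  | i :: l => if e ≤ i then i :: greedySel m (i + m) l else greedySel m e l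

-- B's pass-3 painting, in the shape the proof composes
def paintAbs (n m : Nat) (block : List String) (i : Nat) : List Nat → List String
  | [] => List.replicate (n - i) "O"
  | c :: cs => List.replicate (c - i) "O" ++ block ++ paintAbs n m block (c + m) cs

-- ---- basic facts ----

lemma tagA_inner_eq (text name : List String) (i m : Nat) :
    ∀ j (b : Bool), tagA_inner text name i m b j =
      (b && decide (∀ k, j ≤ k → k < m → text.getD (i + k) "" = name.getD k "")) := by
  have H : ∀ d j (b : Bool), m - j ≤ d → tagA_inner text name i m b j =
      (b && decide (∀ k, j ≤ k → k < m → text.getD (i + k) "" = name.getD k "")) := by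
    intro d
    induction d with
    | zero =>
      intro j b hd
      rw [tagA_inner]
      have hjm : ¬ j < m := by omega
      simp [hjm]
      intro _ k hk hk'
      omega
    | succ d ih =>
      intro j b hd
      rw [tagA_inner]
      by_cases hb : b = true
      · by_cases hjm : j < m
        · simp only [hb, hjm, and_true, if_pos trivial]
          rw [ih (j+1) _ (by omega)]
          by_cases hhead : text.getD (i + j) "" = name.getD j ""
          · simp only [hhead, beq_self_eq_true, Bool.true_and]
            congr 1
            apply propext
            constructor
            · intro h k hk hk'
              rcases Nat.eq_or_lt_of_le hk with rfl | hlt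
              · exact hhead
              · exact h k hlt hk'
            · intro h k hk hk'
              exact h k (by omega) hk'
          · have : (text.getD (i + j) "" == name.getD j "") = false := by
              simpa [List.getD] using hhead
            simp only [this, Bool.false_and]
            symm
            simp only [Bool.and_eq_false_iff]
            right
            simp only [decide_eq_false_iff_not]
            intro h
            exact hhead (h j le_rfl hjm)
        · simp [hb, hjm]
          intro k hk hk'; omega
      · simp at hb
        simp [hb]
  intro j b
  exact H (m - j) j b le_rfl

lemma slice_eq_iff (text name : List String) (i : Nat) (hm : 1 ≤ name.length) :
    (PySem.List.slice text (some (i : Int)) (some ((i : Int) + (name.length : Int))) = name) ↔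
      (i + name.length ≤ text.length ∧
        ∀ k, k < name.length → text.getD (i + k) "" = name.getD k "") := by
  rw [PySem.List.slice_natCast_add]
  constructor
  · intro h
    have hlen : ((text.drop i).take name.length).length = name.length := by rw [h]
    simp [List.length_take, List.length_drop] at hlen
    have hle : i + name.length ≤ text.length := by omega
    refine ⟨hle, ?_⟩
    intro k hk
    have h1 : ((text.drop i).take name.length).getD k "" = name.getD k "" := by rw [h]
    rw [List.getD_eq_getElem?_getD, List.getD_eq_getElem?_getD] at h1 ⊢
    rw [← h1]
    congr 1
    rw [List.getElem?_take_of_lt hk, List.getElem?_drop]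
  · rintro ⟨hle, hall⟩
    apply List.ext_getElem
    · simp [List.length_take, List.length_drop]; omega
    · intro k hk1 hk2
      have := hall k hk2
      rw [List.getD_eq_getElem?_getD, List.getD_eq_getElem?_getD] at this
      rw [List.getElem?_eq_getElem (by omega : i + k < text.length)] at this
      rw [List.getElem?_eq_getElem hk2] at this
      simp at this
      simp [List.getElem_take, List.getElem_drop]
      exact this

lemma pMatch_imp_le (text name : List String) (i : Nat) (hm : 1 ≤ name.length) (h : pMatch text name i = true) :
    i + name.length ≤ text.length := by
  unfold pMatch at h
  rw [beq_iff_eq] at h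
  exact ((slice_eq_iff text name i hm).mp h).1

lemma block_length (m : Nat) (entTag : String) (hm : 1 ≤ m) :
    (if m = 1 then ["S-" ++ entTag]
     else List.replicate (m - 1) ("B-" ++ entTag) ++ ["E-" ++ entTag]).length = m := by
  split_ifs with h
  · simp [h]
  · simp; omega

lemma sel_ge (text name : List String) : ∀ e c, c ∈ selR text name e → e ≤ c := by
  have H : ∀ d e, text.length - e ≤ d → ∀ c, c ∈ selR text name e → e ≤ c := by
    intro d
    induction d with
    | zero =>
      intro e hd c hc
      rw [selR] at hc
      have : ¬ e < text.length := by omega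
      simp [this] at hc
    | succ d ih =>
      intro e hd c hc
      rw [selR] at hc
      by_cases he : e < text.length
      · rw [if_pos he] at hc
        by_cases hp : pMatch text name e = true
        · rw [if_pos hp] at hc
          rcases List.mem_cons.mp hc with rfl | hc
          · exact le_rfl
          · have := ih (max (e + name.length) (e + 1)) (by omega) c hc
            omega
        · rw [if_neg hp] at hc
          have := ih (e + 1) (by omega) c hc
          omega
      · rw [if_neg he] at hc
        simp at hc
  exact fun e => H (text.length - e) e le_rfl

-- ---- pass 2: the fold is greedySel ----

lemma fold_chosen (m : Nat) : ∀ (l : List Nat) (c : List Nat) (e : Nat),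
    (l.foldl (fun (s : List Nat × Nat) i => if s.2 ≤ i then (s.1 ++ [i], i + m) else s) (c, e)).1
      = c ++ greedySel m e l := by
  intro l
  induction l with
  | nil => intro c e; simp [greedySel]
  | cons i l ih =>
    intro c e
    simp only [List.foldl_cons, greedySel]
    by_cases h : e ≤ i
    · rw [if_pos h, if_pos h, ih]
      simp
    · rw [if_neg h, if_neg h, ih]

-- ---- greedySel bookkeeping ----

lemma greedy_all_lt (m e : Nat) : ∀ l : List Nat, (∀ x ∈ l, x < e) → greedySel m e l = [] := by
  intro l
  induction l with
  | nil => intro; rfl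
  | cons i l ih =>
    intro h
    have := h i (by simp)
    simp only [greedySel, if_neg (by omega : ¬ e ≤ i)]
    exact ih (fun x hx => h x (by simp [hx]))

lemma greedy_append_lt (m e : Nat) (l1 l2 : List Nat) (h : ∀ x ∈ l1, x < e) :
    greedySel m e (l1 ++ l2) = greedySel m e l2 := by
  induction l1 with
  | nil => simp
  | cons i l ih =>
    have := h i (by simp)
    simp only [List.cons_append, greedySel, if_neg (by omega : ¬ e ≤ i)]
    exact ih (fun x hx => h x (by simp [hx]))

lemma greedy_mono (m : Nat) : ∀ (l : List Nat) (e e' : Nat), e ≤ e' → (∀ x ∈ l, e' ≤ x) →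
    greedySel m e l = greedySel m e' l := by
  intro l
  induction l with
  | nil => intros; rfl
  | cons i l ih =>
    intro e e' he h
    have hi := h i (by simp)
    simp only [greedySel, if_pos (by omega : e ≤ i), if_pos hi]

lemma greedy_range_shift (text name : List String) (m : Nat) (a L e : Nat) (ha : a ≤ e) :
    greedySel m e (((List.range' a L).filter (pMatch text name)))
      = greedySel m e (((List.range' e (a + L - e)).filter (pMatch text name))) := by
  by_cases h : e ≤ a + L
  · have hsplit : List.range' a L = List.range' a (e - a) ++ List.range' e (L - (e - a)) := by
      have h1 : List.range' a (e - a) ++ List.range' (a + 1 * (e - a)) (L - (e - a))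
          = List.range' a ((e - a) + (L - (e - a))) := List.range'_append
      rw [show a + 1 * (e - a) = e by omega, show (e - a) + (L - (e - a)) = L by omega] at h1
      exact h1.symm
    rw [hsplit, List.filter_append,
        greedy_append_lt m e _ _ (fun x hx => by
          have := List.mem_range'_1.mp (List.mem_of_mem_filter hx); omega),
        show L - (e - a) = a + L - e by omega]
  · rw [greedy_all_lt, greedy_all_lt]
    · intro x hx
      have := List.mem_range'_1.mp (List.mem_of_mem_filter hx)
      omega
    · intro x hx
      have := List.mem_range'_1.mp (List.mem_of_mem_filter hx)
      omega

-- ---- selR is the greedy selection over the match list (pass 1 + pass 2) ----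

lemma selR_eq_greedy (text name : List String) (hm : 1 ≤ name.length) :
    ∀ e, selR text name e
      = greedySel name.length e
          ((List.range' e (text.length + 1 - name.length - e)).filter (pMatch text name)) := by
  have H : ∀ d e, text.length - e ≤ d → selR text name e
      = greedySel name.length e
          ((List.range' e (text.length + 1 - name.length - e)).filter (pMatch text name)) := by
    intro d
    induction d with
    | zero =>
      intro e hd
      rw [selR]
      have he : ¬ e < text.length := by omega
      rw [if_neg he]
      rw [greedy_all_lt]
      intro x hx
      have := List.mem_range'_1.mp (List.mem_of_mem_filter hx)
      omega
    | succ d ih =>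
      intro e hd
      rw [selR]
      by_cases he : e < text.length
      · rw [if_pos he]
        by_cases hle : e + name.length ≤ text.length
        · -- the range at e is nonempty
          have hlen : text.length + 1 - name.length - e = (text.length - name.length - e) + 1 := by omega
          rw [hlen, List.range'_succ, List.filter_cons]
          by_cases hp : pMatch text name e = true
          · rw [if_pos hp, if_pos (by simp [hp])]
            simp only [greedySel, if_pos (le_refl e)]
            congr 1
            have hmax : max (e + name.length) (e + 1) = e + name.length := by omega
            rw [hmax, ih (e + name.length) (by omega),
                greedy_range_shift text name name.length (e + 1) (text.length - name.length - e) (e + name.length) (by omega),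
                show (e + 1) + (text.length - name.length - e) - (e + name.length) = text.length + 1 - name.length - (e + name.length) by omega]
          · rw [if_neg hp, if_neg (by simp [hp])]
            rw [ih (e + 1) (by omega),
                show text.length + 1 - name.length - (e + 1) = text.length - name.length - e by omega]
            exact (greedy_mono name.length _ e (e + 1) (by omega) (fun x hx => by
              have := List.mem_range'_1.mp (List.mem_of_mem_filter hx); omega)).symm
        · -- e + name.length > text.length : no match possible at e, and the range is empty
          have hp : pMatch text name e = false := by
            by_contra h
            have := pMatch_imp_le text name e hm (by simpa using h)
            omega
          rw [if_neg (by simp [hp])]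
          have hlen : text.length + 1 - name.length - e = 0 := by omega
          rw [hlen]
          simp only [List.range'_zero, List.filter_nil]
          rw [ih (e + 1) (by omega)]
          have hlen' : text.length + 1 - name.length - (e + 1) = 0 := by omega
          rw [hlen']
          simp [greedySel]
      · rw [if_neg he]
        rw [greedy_all_lt]
        intro x hx
        have := List.mem_range'_1.mp (List.mem_of_mem_filter hx)
        omega
  exact fun e => H (text.length - e) e le_rfl

-- ---- A's loop is tagR ----

lemma tagA_eq_tagR (text name : List String) (entTag : String) (hm : 1 ≤ name.length) :
    ∀ e acc, tagA_loop text name entTag text.length name.length e acc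
      = acc ++ tagR text name
          (if name.length = 1 then ["S-" ++ entTag]
           else List.replicate (name.length - 1) ("B-" ++ entTag) ++ ["E-" ++ entTag]) e := by
  have hblock : True := trivial
  have H : ∀ d e acc, text.length - e ≤ d →
      tagA_loop text name entTag text.length name.length e acc = acc ++ tagR text name (if name.length = 1 then ["S-" ++ entTag] else List.replicate (name.length - 1) ("B-" ++ entTag) ++ ["E-" ++ entTag]) e := by
    intro d
    induction d with
    | zero =>
      intro e acc hd
      have he : ¬ e < text.length := by omega
      rw [tagA_loop, tagR, dif_neg he, if_neg he, List.append_nil]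
    | succ d ih =>
      intro e acc hd
      by_cases he : e < text.length
      · rw [tagA_loop, tagR, dif_pos he, if_pos he]
        by_cases hp : pMatch text name e = true
        · -- full match at e
          have hs : PySem.List.slice text (some (e : Int)) (some ((e : Int) + (name.length : Int))) = name := by
            have := hp; unfold pMatch at this; exact beq_iff_eq.mp this
          obtain ⟨hle, hall⟩ := (slice_eq_iff text name e hm).mp hs
          have hhead : text.getD e "" = name.getD 0 "" := by
            have := hall 0 (by omega); simpa using this
          rw [if_neg (by simpa using hhead), if_pos hp]
          by_cases hm1 : name.length = 1
          · rw [if_pos hm1]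
            have h1 : (if name.length = 1 then ["S-" ++ entTag] else List.replicate (name.length - 1) ("B-" ++ entTag) ++ ["E-" ++ entTag]) = ["S-" ++ entTag] := by rw [if_pos hm1]
            have h2 : max (e + name.length) (e + 1) = e + 1 := by omega
            rw [h2, ih (e + 1) _ (by omega), h1]
            simp
          · rw [if_neg hm1]
            have hEnt : tagA_inner text name e name.length (decide (e + name.length ≤ text.length)) 1 = true := by
              rw [tagA_inner_eq]
              simp only [Bool.and_eq_true, decide_eq_true_eq]
              exact ⟨hle, fun k hk hk' => hall k hk'⟩
            simp only [hEnt, if_pos]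
            have h2 : e + max name.length 1 = max (e + name.length) (e + 1) := by omega
            rw [h2, ih (max (e + name.length) (e + 1)) _ (by omega)]
            have hacc : ((acc ++ ["B-" ++ entTag]) ++ (List.range' 1 (name.length - 1 - 1)).map (fun _ => "B-" ++ entTag)) ++ ["E-" ++ entTag]
                = acc ++ (if name.length = 1 then ["S-" ++ entTag] else List.replicate (name.length - 1) ("B-" ++ entTag) ++ ["E-" ++ entTag]) := by
              rw [if_neg hm1]
              have hrep : (List.range' 1 (name.length - 1 - 1)).map (fun _ => "B-" ++ entTag)
                  = List.replicate (name.length - 2) ("B-" ++ entTag) := by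
                rw [List.map_const']
                have : name.length - 1 - 1 = name.length - 2 := by omega
                simp [this]
              rw [hrep]
              have hstep : List.replicate (name.length - 1) ("B-" ++ entTag)
                  = ("B-" ++ entTag) :: List.replicate (name.length - 2) ("B-" ++ entTag) := by
                have h3 : name.length - 1 = (name.length - 2) + 1 := by omega
                rw [h3, List.replicate_succ]
              rw [hstep]
              simp
            rw [hacc]
            simp
        · -- no match at e
          rw [if_neg hp]
          by_cases hhead : text.getD e "" = name.getD 0 ""
          · rw [if_neg (by simpa using hhead)]
            by_cases hm1 : name.length = 1
            · exfalso
              apply hp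
              unfold pMatch
              rw [beq_iff_eq]
              apply (slice_eq_iff text name e hm).mpr
              refine ⟨by omega, ?_⟩
              intro k hk
              have hk0 : k = 0 := by omega
              subst hk0
              simpa using hhead
            · rw [if_neg hm1]
              have hEnt : tagA_inner text name e name.length (decide (e + name.length ≤ text.length)) 1 = false := by
                rw [tagA_inner_eq]
                by_contra hc
                simp only [Bool.not_eq_false, Bool.and_eq_true, decide_eq_true_eq] at hc
                apply hp
                unfold pMatch
                rw [beq_iff_eq]
                apply (slice_eq_iff text name e hm).mpr
                refine ⟨hc.1, ?_⟩
                intro k hk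
                rcases Nat.eq_zero_or_pos k with rfl | hk0
                · simpa using hhead
                · exact hc.2 k hk0 hk
              rw [hEnt]
              rw [if_neg (by simp : ¬ (false = true))]
              rw [ih (e + 1) _ (by omega)]
              simp
          · rw [if_pos (by simpa using hhead)]
            rw [ih (e + 1) _ (by omega)]
            simp
      · rw [tagA_loop, tagR, dif_neg he, if_neg he, List.append_nil]
  exact fun e acc => H (text.length - e) e acc le_rfl

-- ---- painting: a step and a shift lemma ----

lemma paintAbs_step (n m : Nat) (block : List String) (e : Nat) (cs : List Nat)
    (he : e < n) (hcs : ∀ c ∈ cs, e + 1 ≤ c) :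
    paintAbs n m block e cs = "O" :: paintAbs n m block (e + 1) cs := by
  cases cs with
  | nil =>
    simp only [paintAbs]
    rw [show n - e = (n - (e + 1)) + 1 by omega, List.replicate_succ]
  | cons c cs =>
    have hc := hcs c (by simp)
    simp only [paintAbs]
    rw [show c - e = (c - (e + 1)) + 1 by omega, List.replicate_succ]
    simp

lemma paint_shift (m : Nat) (block : List String) :
    ∀ (cs : List Nat) (P Q : List String), (∀ c ∈ cs, P.length ≤ c) →
    cs.foldl (fun tags i => tags.take i ++ block ++ tags.drop (i + m)) (P ++ Q)
      = P ++ (cs.map (· - P.length)).foldl (fun tags i => tags.take i ++ block ++ tags.drop (i + m)) Q := by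
  intro cs
  induction cs with
  | nil => intro P Q _; simp
  | cons c cs ih =>
    intro P Q h
    have hc := h c (by simp)
    simp only [List.foldl_cons, List.map_cons]
    have hwrite : (P ++ Q).take c ++ block ++ (P ++ Q).drop (c + m)
        = P ++ (Q.take (c - P.length) ++ block ++ Q.drop (c - P.length + m)) := by
      rw [List.take_append, List.drop_append]
      rw [List.take_of_length_le (by omega), List.drop_of_length_le (by omega)]
      simp only [List.nil_append]
      rw [show c + m - P.length = c - P.length + m by omega]
      simp
    rw [hwrite, ih P _ (fun x hx => h x (by simp [hx]))]

-- ---- pass 3 over selR is paintAbs ----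

lemma paint_sel (text name : List String) (entTag : String) (hm : 1 ≤ name.length) :
    ∀ e, ((selR text name e).map (· - e)).foldl
        (fun tags i => tags.take i ++
            (if name.length = 1 then ["S-" ++ entTag]
             else List.replicate (name.length - 1) ("B-" ++ entTag) ++ ["E-" ++ entTag]) ++
            tags.drop (i + name.length))
        (List.replicate (text.length - e) "O")
      = paintAbs text.length name.length
          (if name.length = 1 then ["S-" ++ entTag]
           else List.replicate (name.length - 1) ("B-" ++ entTag) ++ ["E-" ++ entTag]) e
          (selR text name e) := by
  have hbl : (if name.length = 1 then ["S-" ++ entTag] else List.replicate (name.length - 1) ("B-" ++ entTag) ++ ["E-" ++ entTag]).length = name.length := block_length name.length entTag hm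
  have H : ∀ d e, text.length - e ≤ d →
      ((selR text name e).map (· - e)).foldl
        (fun tags i => tags.take i ++ (if name.length = 1 then ["S-" ++ entTag] else List.replicate (name.length - 1) ("B-" ++ entTag) ++ ["E-" ++ entTag]) ++ tags.drop (i + name.length))
        (List.replicate (text.length - e) "O")
      = paintAbs text.length name.length (if name.length = 1 then ["S-" ++ entTag] else List.replicate (name.length - 1) ("B-" ++ entTag) ++ ["E-" ++ entTag]) e (selR text name e) := by
    intro d
    induction d with
    | zero =>
      intro e hd
      rw [selR]
      have he : ¬ e < text.length := by omega
      rw [if_neg he]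
      simp [paintAbs]
    | succ d ih =>
      intro e hd
      rw [selR]
      by_cases he : e < text.length
      · rw [if_pos he]
        by_cases hp : pMatch text name e = true
        · rw [if_pos hp]
          have hle : e + name.length ≤ text.length := pMatch_imp_le text name e hm hp
          have hmax : max (e + name.length) (e + 1) = e + name.length := by omega
          rw [hmax]
          simp only [List.map_cons, List.foldl_cons, Nat.sub_self]
          have hw0 : (List.replicate (text.length - e) "O").take 0 ++ (if name.length = 1 then ["S-" ++ entTag] else List.replicate (name.length - 1) ("B-" ++ entTag) ++ ["E-" ++ entTag]) ++ (List.replicate (text.length - e) "O").drop (0 + name.length)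
              = (if name.length = 1 then ["S-" ++ entTag] else List.replicate (name.length - 1) ("B-" ++ entTag) ++ ["E-" ++ entTag]) ++ List.replicate (text.length - (e + name.length)) "O" := by
            simp only [List.take_zero, List.nil_append, Nat.zero_add, List.drop_replicate]
            congr 2
            omega
          rw [hw0]
          have hge : ∀ c ∈ (selR text name (e + name.length)).map (· - e), (if name.length = 1 then ["S-" ++ entTag] else List.replicate (name.length - 1) ("B-" ++ entTag) ++ ["E-" ++ entTag]).length ≤ c := by
            intro c hc
            obtain ⟨x, hx, rfl⟩ := List.mem_map.mp hc
            have := sel_ge text name (e + name.length) x hx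
            omega
          rw [paint_shift name.length (if name.length = 1 then ["S-" ++ entTag] else List.replicate (name.length - 1) ("B-" ++ entTag) ++ ["E-" ++ entTag]) _ (if name.length = 1 then ["S-" ++ entTag] else List.replicate (name.length - 1) ("B-" ++ entTag) ++ ["E-" ++ entTag]) (List.replicate (text.length - (e + name.length)) "O") hge]
          rw [hbl]
          have hmm : ((selR text name (e + name.length)).map (· - e)).map (· - name.length)
              = (selR text name (e + name.length)).map (· - (e + name.length)) := by
            rw [List.map_map]
            apply List.map_congr_left
            intro x _
            simp only [Function.comp_apply]
            omega
          rw [hmm, ih (e + name.length) (by omega)]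
          simp only [paintAbs, Nat.sub_self, List.replicate_zero, List.nil_append]
        · rw [if_neg hp]
          have hge : ∀ c ∈ (selR text name (e + 1)).map (· - e), (1 : Nat) ≤ c := by
            intro c hc
            obtain ⟨x, hx, rfl⟩ := List.mem_map.mp hc
            have := sel_ge text name (e + 1) x hx
            omega
          have hrep : List.replicate (text.length - e) "O" = ["O"] ++ List.replicate (text.length - (e + 1)) "O" := by
            rw [show text.length - e = (text.length - (e + 1)) + 1 by omega]
            simp [List.replicate_succ]
          rw [hrep]
          rw [paint_shift name.length (if name.length = 1 then ["S-" ++ entTag] else List.replicate (name.length - 1) ("B-" ++ entTag) ++ ["E-" ++ entTag]) _ ["O"] (List.replicate (text.length - (e + 1)) "O")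
            (by simpa using hge)]
          have hmm : ((selR text name (e + 1)).map (· - e)).map (· - (["O"] : List String).length)
              = (selR text name (e + 1)).map (· - (e + 1)) := by
            rw [List.map_map]
            apply List.map_congr_left
            intro x _
            simp only [Function.comp_apply, List.length_singleton]
            omega
          rw [hmm, ih (e + 1) (by omega)]
          rw [paintAbs_step text.length name.length (if name.length = 1 then ["S-" ++ entTag] else List.replicate (name.length - 1) ("B-" ++ entTag) ++ ["E-" ++ entTag]) e _ he]
          · simp
          · intro c hc
            exact sel_ge text name (e + 1) c hc
      · rw [if_neg he]
        simp [paintAbs]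
  exact fun e => H (text.length - e) e le_rfl

-- ===== VERDICT (by name: the statement is the Claim_ definition above) =====
theorem tag_str_list_spec : Claim_equal_tag_str_list := by
  intro text name entTag _ hpre
  unfold Spec_tag_str_list tag_str_list tag_str_list_alt
  by_cases hn : name = []
  · have htext : text = [] := by
      rcases hpre with h | h
      · exact h
      · exact absurd hn h
    subst htext hn
    rw [tagA_loop, dif_neg (by simp)]
    simp
  · have hm : 1 ≤ name.length := List.length_pos_of_ne_nil hn
    simp only [List.isEmpty_iff, hn, ite_false]
    rw [tagA_eq_tagR text name entTag hm 0 []]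
    rw [List.nil_append]
    rw [fold_chosen name.length _ [] 0, List.nil_append]
    have hrange : List.range (text.length + 1 - name.length)
        = List.range' 0 (text.length + 1 - name.length) := List.range_eq_range'
    rw [hrange]
    have h0 := selR_eq_greedy text name hm 0
    rw [Nat.sub_zero] at h0
    rw [← h0]
    have := paint_sel text name entTag hm 0
    rw [Nat.sub_zero] at this
    rw [show (selR text name 0).map (· - 0) = selR text name 0 by simp] at this
    rw [this]
    -- tagR = paintAbs ∘ selR
    have H : ∀ d e, text.length - e ≤ d →
        tagR text name (if name.length = 1 then ["S-" ++ entTag]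
           else List.replicate (name.length - 1) ("B-" ++ entTag) ++ ["E-" ++ entTag]) e
        = paintAbs text.length name.length
            (if name.length = 1 then ["S-" ++ entTag]
             else List.replicate (name.length - 1) ("B-" ++ entTag) ++ ["E-" ++ entTag]) e
            (selR text name e) := by
      intro d
      induction d with
      | zero =>
        intro e hd
        rw [tagR, selR]
        have he : ¬ e < text.length := by omega
        rw [if_neg he, if_neg he]
        simp [paintAbs]
        omega
      | succ d ih =>
        intro e hd
        rw [tagR, selR]
        by_cases he : e < text.length
        · rw [if_pos he, if_pos he]
          by_cases hp : pMatch text name e = true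
          · rw [if_pos hp, if_pos hp]
            simp only [paintAbs, Nat.sub_self, List.replicate_zero, List.nil_append]
            congr 1
            have hle := pMatch_imp_le text name e hm hp
            have hmax : max (e + name.length) (e + 1) = e + name.length := by omega
            rw [hmax] at *
            exact ih (e + name.length) (by omega)
          · rw [if_neg hp, if_neg hp]
            rw [ih (e + 1) (by omega)]
            rw [paintAbs_step text.length name.length _ e _ he]
            intro c hc
            exact sel_ge text name (e + 1) c hc
        · rw [if_neg he, if_neg he]
          simp [paintAbs]
          omega
    exact H (text.length - 0) 0 le_rfl
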